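-- pv_equiv track=rewrite | github.com/moradi2558/Backend_task_test | agor_chini.py | dp
-- ===== SOURCE A (Python) =====
-- def dp(matrix,i,j,n):
--     if j == 0 or i == n-1 :
--         return 1
--     else :
--         x = n
--         y = j-1
--         counter = 0
--         while x >= j-1 and y >= 0 :
--             counter +=1
--             x-=1
--             y-=1
--         return counter
-- ===== SOURCE B (Python) =====
-- def dp(matrix, i, j, n):
--     if j == 0 or i == n - 1:
--         return 1
--     return max(0, min(n - j + 1, j - 1) + 1)
-- ===== Notes on version B (the rewrite author's own statement) =====
-- stated objective: simpler
-- what changed: Replaced the decrement-two-counters while loop with the closed form max(0, min(n-j+1, j-1)+1) that counts its iterations directly.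
import Mathlib
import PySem

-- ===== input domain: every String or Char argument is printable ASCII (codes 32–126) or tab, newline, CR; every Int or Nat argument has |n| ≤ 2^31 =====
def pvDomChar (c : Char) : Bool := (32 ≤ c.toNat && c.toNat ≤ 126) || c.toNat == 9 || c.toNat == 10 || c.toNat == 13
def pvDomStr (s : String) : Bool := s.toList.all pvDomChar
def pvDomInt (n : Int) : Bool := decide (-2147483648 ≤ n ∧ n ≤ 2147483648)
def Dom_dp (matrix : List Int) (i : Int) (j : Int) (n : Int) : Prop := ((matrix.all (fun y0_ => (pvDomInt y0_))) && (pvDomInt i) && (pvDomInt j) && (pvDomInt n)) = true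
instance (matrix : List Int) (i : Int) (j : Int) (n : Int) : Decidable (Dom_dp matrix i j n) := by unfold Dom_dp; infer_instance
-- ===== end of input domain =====

-- B replaces A's decrement loop with the closed form max(0, min(n-j+1, j-1)+1): simpler, loop-free.

-- ===== PORT A =====
-- the while loop: while x >= j-1 and y >= 0: counter += 1; x -= 1; y -= 1
def dpLoop (jm1 : Int) (x : Int) (y : Int) (counter : Int) : Int :=
  if _h : x ≥ jm1 ∧ y ≥ 0 then dpLoop jm1 (x - 1) (y - 1) (counter + 1)
  else counter
termination_by (y + 1).toNat
decreasing_by omega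

def dp (matrix : List Int) (i : Int) (j : Int) (n : Int) : Int :=
  if j = 0 ∨ i = n - 1 then 1
  else dpLoop (j - 1) n (j - 1) 0

-- ===== PORT B =====
def dp_alt (matrix : List Int) (i : Int) (j : Int) (n : Int) : Int :=
  if j = 0 ∨ i = n - 1 then 1
  else max 0 (min (n - j + 1) (j - 1) + 1)

-- ===== PRECONDITION & SPEC =====
def Spec_dp (matrix : List Int) (i : Int) (j : Int) (n : Int) (out : Int) : Prop := out = dp_alt matrix i j n
instance (matrix : List Int) (i : Int) (j : Int) (n : Int) (out : Int) : Decidable (Spec_dp matrix i j n out) := by unfold Spec_dp; infer_instance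

-- ===== CLAIM (what is proved, stated in full; the proofs are below) =====
def Claim_equal_dp : Prop := ∀ (matrix : List Int) (i : Int) (j : Int) (n : Int), Dom_dp matrix i j n → Spec_dp matrix i j n (dp matrix i j n)

-- ===== LEMMAS AND PROOFS =====
lemma dpLoop_closed (jm1 x y counter : Int) :
    dpLoop jm1 x y counter = counter + max 0 (min (x - jm1) y + 1) := by
  fun_induction dpLoop jm1 x y counter with
  | case1 x y counter h ih => rw [ih]; omega
  | case2 x y counter h => omega

-- ===== VERDICT (by name: the statement is the Claim_ definition above) =====
theorem dp_spec : Claim_equal_dp := by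
  intro matrix i j n _
  unfold Spec_dp dp dp_alt
  split
  · rfl
  · rw [dpLoop_closed]; omega
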